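-- pv_equiv track=rewrite | github.com/Hirocreeper02/travail-de-maturite-2023 | jeu/NomDuJeu/scripts/mechanics/load.py | cellEpuration
-- ===== SOURCE A (Python) =====
-- def cellEpuration(liste:list) -> str:
--
--     for i in range(len(liste)):
--
--         liste[i] = liste[i].replace("\n","")
--
--     while True:
--         if "" in liste:
--             liste.remove("")
--         else:
--             return liste
-- ===== SOURCE B (Python) =====
-- def cellEpuration(liste: list) -> str:
--     # Single-pass in-place two-pointer compaction (same object mutated and returned).
--     w = 0
--     for i in range(len(liste)):
--         s = liste[i].replace("\n", "")
--         if s != "":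
--             liste[w] = s
--             w += 1
--     del liste[w:]
--     return liste
-- ===== Notes on version B (the rewrite author's own statement) =====
-- stated objective: alternative
-- what changed: Replaces the map pass plus repeated '"" in liste' scan-and-remove loop with a single-pass two-pointer in-place compaction (write index, then one tail truncation).
import Mathlib
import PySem

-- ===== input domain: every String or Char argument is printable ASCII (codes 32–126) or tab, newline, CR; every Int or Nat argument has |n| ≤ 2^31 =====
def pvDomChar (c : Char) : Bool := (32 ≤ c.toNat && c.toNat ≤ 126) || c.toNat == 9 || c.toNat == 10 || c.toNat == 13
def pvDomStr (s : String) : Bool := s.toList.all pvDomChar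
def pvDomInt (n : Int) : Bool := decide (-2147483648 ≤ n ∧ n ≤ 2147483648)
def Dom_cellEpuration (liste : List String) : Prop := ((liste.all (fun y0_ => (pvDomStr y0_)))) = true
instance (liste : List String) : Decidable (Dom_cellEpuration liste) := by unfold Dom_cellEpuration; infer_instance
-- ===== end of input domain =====

-- B replaces A's transform pass + repeated membership-scan-and-remove loop by a single-pass
-- two-pointer in-place compaction (objective: alternative). Both mutate the argument list in
-- Python; the equivalence proved here is about the RETURN value (B also mutates in place and
-- returns the same object, like A).

-- ===== PORT A =====
-- A's 'while True: if "" in liste: liste.remove("") else: return liste' loop;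
-- terminates because remove shortens the list.
def pyWhileRemoveEmpty (l : List String) : List String :=
  if h : "" ∈ l then
    pyWhileRemoveEmpty ((PySem.List.remove? l "").getD l)
  else l
termination_by l.length
decreasing_by
  rw [PySem.List.remove?_eq_some_erase l "" h, Option.getD_some]
  have h1 := List.length_erase_of_mem h
  have h2 := List.length_pos_of_mem h
  omega

def cellEpuration (liste : List String) : List String :=
  pyWhileRemoveEmpty (liste.map (fun s => PySem.Str.replace s "\n" ""))

-- ===== PORT B =====
def cellEpuration_alt (liste : List String) : List String :=
  let st := (List.range liste.length).foldl
    (fun (st : List String × Nat) i =>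
      let s := PySem.Str.replace ((PySem.List.pyGet? st.1 (Int.ofNat i)).getD "") "\n" ""
      if s ≠ "" then (st.1.set st.2 s, st.2 + 1) else st)
    (liste, 0)
  st.1.take st.2   -- del liste[w:]

-- ===== PRECONDITION & SPEC =====
def Spec_cellEpuration (liste : List String) (out : List String) : Prop := out = cellEpuration_alt liste
instance (liste : List String) (out : List String) : Decidable (Spec_cellEpuration liste out) := by unfold Spec_cellEpuration; infer_instance

-- ===== CLAIM (what is proved, stated in full; the proofs are below) =====
def Claim_equal_cellEpuration : Prop := ∀ (liste : List String), Dom_cellEpuration liste → Spec_cellEpuration liste (cellEpuration liste)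

-- ===== LEMMAS AND PROOFS =====

-- Both sides equal this filter of the newline-stripped list.
def pvF (liste : List String) : List String :=
  (liste.map (fun s => PySem.Str.replace s "\n" "")).filter (fun s => !(s == ""))

theorem pvFilter_erase_empty (l : List String) (h : "" ∈ l) :
    (l.erase "").filter (fun s => !(s == "")) = l.filter (fun s => !(s == "")) := by
  induction l with
  | nil => cases h
  | cons x xs ih =>
    by_cases hx : x = ""
    · subst hx; simp
    · simp only [List.erase_cons, beq_iff_eq, if_neg hx, List.filter_cons]
      have hm : "" ∈ xs := by
        cases h with
        | head => exact absurd rfl hx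
        | tail _ h' => exact h'
      by_cases hb : (!(x == "")) = true <;> simp [hb, ih hm]

theorem pyWhileRemoveEmpty_eq (l : List String) :
    pyWhileRemoveEmpty l = l.filter (fun s => !(s == "")) := by
  by_cases h : "" ∈ l
  · rw [pyWhileRemoveEmpty, dif_pos h,
      PySem.List.remove?_eq_some_erase l "" h, Option.getD_some,
      pyWhileRemoveEmpty_eq (l.erase ""), pvFilter_erase_empty l h]
  · rw [pyWhileRemoveEmpty, dif_neg h]
    symm
    apply List.filter_eq_self.mpr
    intro a ha
    simp only [Bool.not_eq_eq_eq_not, Bool.not_true]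
    exact beq_eq_false_iff_ne.mpr (fun hv => h (hv ▸ ha))
termination_by l.length
decreasing_by
  have h1 := List.length_erase_of_mem h
  have h2 := List.length_pos_of_mem h
  omega

theorem cellEpuration_alt_fold (liste : List String) (n : Nat) :
    ∀ (k : Nat) (out : List String), k + n = liste.length → out.length ≤ k →
    out = ((liste.map (fun s => PySem.Str.replace s "\n" "")).take k).filter (fun s => !(s == "")) →
    (List.range' k n).foldl
      (fun (st : List String × Nat) i =>
        let s := PySem.Str.replace ((PySem.List.pyGet? st.1 (Int.ofNat i)).getD "") "\n" ""
        if s ≠ "" then (st.1.set st.2 s, st.2 + 1) else st)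
      (out ++ liste.drop out.length, out.length)
    = (pvF liste ++ liste.drop (pvF liste).length, (pvF liste).length) := by
  induction n with
  | zero =>
    intro k out hk _ hout
    have hkl : k = liste.length := by omega
    subst hkl
    have hF : out = pvF liste := by
      rw [hout, pvF]
      congr 1
      exact List.take_of_length_le (by simp)
    simp [hF]
  | succ n ih =>
    intro k out hk hw hout
    have hklt : k < liste.length := by omega
    have hget : PySem.List.pyGet? (out ++ liste.drop out.length) (Int.ofNat k) = some liste[k] := by
      rw [Int.ofNat_eq_natCast, PySem.List.pyGet?_natCast,
        List.getElem?_append_right hw, List.getElem?_drop]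
      have h3 : out.length + (k - out.length) = k := by omega
      rw [h3, List.getElem?_eq_getElem hklt]
    have htake : (liste.map (fun s => PySem.Str.replace s "\n" "")).take (k + 1)
        = (liste.map (fun s => PySem.Str.replace s "\n" "")).take k
          ++ [PySem.Str.replace liste[k] "\n" ""] := by
      rw [List.take_add_one, List.getElem?_map, List.getElem?_eq_getElem hklt]
      simp
    simp only [List.range'_succ, List.foldl_cons, hget, Option.getD_some]
    by_cases hse : PySem.Str.replace liste[k] "\n" "" = ""
    · rw [if_neg (by simp [hse])]
      apply ih (k + 1) out (by omega) (by omega)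
      rw [htake, List.filter_append, hout]
      simp [hse]
    · rw [if_pos (by simp [hse])]
      have hdrop : liste.drop out.length = liste[out.length] :: liste.drop (out.length + 1) := by
        rw [List.drop_eq_getElem_cons (by omega)]
      have hset : (out ++ liste.drop out.length).set out.length (PySem.Str.replace liste[k] "\n" "")
          = (out ++ [PySem.Str.replace liste[k] "\n" ""]) ++ liste.drop (out.length + 1) := by
        rw [List.set_append_right _ _ (le_refl _), Nat.sub_self]
        rw [hdrop, List.set_cons_zero]
        simp
      have hlen : (out ++ [PySem.Str.replace liste[k] "\n" ""]).length = out.length + 1 := by simp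
      have hnext : out ++ [PySem.Str.replace liste[k] "\n" ""]
          = ((liste.map (fun s => PySem.Str.replace s "\n" "")).take (k + 1)).filter
              (fun s => !(s == "")) := by
        rw [htake, List.filter_append, ← hout]
        simp [hse]
      have hrec := ih (k + 1) (out ++ [PySem.Str.replace liste[k] "\n" ""]) (by omega)
        (by simp; omega) hnext
      rw [hlen] at hrec
      rw [hset]
      exact hrec

theorem cellEpuration_alt_eq (liste : List String) : cellEpuration_alt liste = pvF liste := by
  unfold cellEpuration_alt
  have h0 : ([] : List String)
      = ((liste.map (fun s => PySem.Str.replace s "\n" "")).take 0).filter (fun s => !(s == "")) := by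
    simp
  have hfold := cellEpuration_alt_fold liste liste.length 0 [] (by omega) (by simp) h0
  simp only [List.range_eq_range', List.drop_zero, List.length_nil, List.nil_append] at hfold ⊢
  rw [hfold]
  simp

-- ===== VERDICT (by name: the statement is the Claim_ definition above) =====
theorem cellEpuration_spec : Claim_equal_cellEpuration := by
  intro liste _
  show cellEpuration liste = cellEpuration_alt liste
  rw [cellEpuration_alt_eq, cellEpuration, pyWhileRemoveEmpty_eq, pvF]
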